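-- pv_equiv track=rewrite | github.com/Yuvaraj0739X/MultiAgent-Professional-Script-Provider | phase3_screenplay/utils.py | format_fountain
-- ===== SOURCE A (Python) =====
-- def format_fountain(text: str) -> str:
--     """
--     Clean and format Fountain text.
--
--     - Removes excessive blank lines
--     - Ensures proper spacing around scene headings
--     - Cleans up whitespace
--
--     Args:
--         text: Raw screenplay text
--
--     Returns:
--         Cleaned and formatted Fountain text
--     """
--     lines = text.split("\n")
--     formatted_lines = []
--
--     previous_was_blank = False
--
--     for line in lines:
--         stripped = line.strip()
--
--         if not stripped:
--             if not previous_was_blank: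
--                 formatted_lines.append("")
--                 previous_was_blank = True
--             continue
--
--         if stripped.startswith("INT.") or stripped.startswith("EXT."):
--             if formatted_lines and formatted_lines[-1]:
--                 formatted_lines.append("")
--
--         formatted_lines.append(stripped)
--         previous_was_blank = False
--
--     return "\n".join(formatted_lines)
-- ===== SOURCE B (Python) =====
-- def format_fountain(text: str) -> str:
--     # Pass 1: strip every line and collapse runs of blank lines to a single "".
--     stripped = [line.strip() for line in text.split("\n")]
--     cleaned = []
--     for s in stripped:
--         if s or not cleaned or cleaned[-1]:
--             cleaned.append(s)
--     # Pass 2: emit, inserting a blank line before scene headings when needed.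
--     out = []
--     for s in cleaned:
--         if (s.startswith("INT.") or s.startswith("EXT.")) and out and out[-1]:
--             out.append("")
--         out.append(s)
--     return "\n".join(out)
-- ===== Notes on version B (the rewrite author's own statement) =====
-- stated objective: alternative
-- what changed: Replaced A's single interleaved state machine (boolean previous_was_blank threaded through one loop) with two independent passes: one that strips lines and collapses blank runs, and a second that inserts blank lines before scene headings.
import Mathlib
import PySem

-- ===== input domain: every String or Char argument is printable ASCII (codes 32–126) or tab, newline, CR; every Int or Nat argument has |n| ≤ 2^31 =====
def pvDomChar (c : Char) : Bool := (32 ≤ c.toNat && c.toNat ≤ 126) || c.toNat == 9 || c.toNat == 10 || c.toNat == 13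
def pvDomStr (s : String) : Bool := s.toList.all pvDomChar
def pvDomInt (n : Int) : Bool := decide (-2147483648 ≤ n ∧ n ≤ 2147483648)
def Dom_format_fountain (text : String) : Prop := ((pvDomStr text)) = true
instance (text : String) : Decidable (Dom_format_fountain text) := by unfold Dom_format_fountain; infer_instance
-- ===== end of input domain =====

-- B replaces A's single loop with interleaved blank-collapsing/heading state by two
-- independent passes (collapse blank runs, then insert blanks before scene headings);
-- objective: alternative decomposition, same cost.

-- truthiness of `lst and lst[-1]` for a list of strings (shared Python idiom in both versions)
def ffLastTruthy (l : List String) : Bool :=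
  match l.getLast? with
  | some s => s != ""
  | none => false

-- ===== PORT A =====
-- loop body of A: state = (formatted_lines, previous_was_blank)
def ffStepA (st : List String × Bool) (line : String) : List String × Bool :=
  let stripped := PySem.Str.strip line
  if stripped == "" then
    if !st.2 then (st.1 ++ [""], true) else st
  else
    let fl :=
      if (PySem.Str.startswith stripped "INT." || PySem.Str.startswith stripped "EXT.")
          && ffLastTruthy st.1 then st.1 ++ [""] else st.1
    (fl ++ [stripped], false)

def format_fountain (text : String) : String :=
  let lines := ((PySem.Str.split? text "\n").getD [])
  PySem.Str.join "\n" (lines.foldl ffStepA ([], false)).1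

-- ===== PORT B =====
-- pass 1 body: keep s unless it is a blank following a blank
def ffCollapseStep (cleaned : List String) (s : String) : List String :=
  if s != "" || cleaned.isEmpty || ffLastTruthy cleaned then cleaned ++ [s] else cleaned

-- pass 2 body: blank line before a scene heading when the last emitted line is non-blank
def ffEmitStep (out : List String) (s : String) : List String :=
  if (PySem.Str.startswith s "INT." || PySem.Str.startswith s "EXT.") && ffLastTruthy out then
    out ++ ["", s]
  else out ++ [s]

def format_fountain_alt (text : String) : String :=
  let stripped := (((PySem.Str.split? text "\n").getD [])).map PySem.Str.strip
  let cleaned := stripped.foldl ffCollapseStep []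
  let out := cleaned.foldl ffEmitStep []
  PySem.Str.join "\n" out

-- ===== PRECONDITION & SPEC =====
def Spec_format_fountain (text : String) (out : String) : Prop := out = format_fountain_alt text
instance (text : String) (out : String) : Decidable (Spec_format_fountain text out) := by unfold Spec_format_fountain; infer_instance

-- ===== CLAIM (what is proved, stated in full; the proofs are below) =====
def Claim_equal_format_fountain : Prop := ∀ (text : String), Dom_format_fountain text → Spec_format_fountain text (format_fountain text)

-- ===== LEMMAS AND PROOFS =====

-- A's step on an already-stripped line
def ffStepA' (st : List String × Bool) (s : String) : List String × Bool :=
  if s == "" then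
    if !st.2 then (st.1 ++ [""], true) else st
  else
    let fl :=
      if (PySem.Str.startswith s "INT." || PySem.Str.startswith s "EXT.")
          && ffLastTruthy st.1 then st.1 ++ [""] else st.1
    (fl ++ [s], false)

-- whether the list ends in a blank line
def ffBlankLast (l : List String) : Bool := l.getLast? == some ""

def ffEmitAll (l : List String) : List String := l.foldl ffEmitStep []

theorem ffLastTruthy_append (l : List String) (s : String) :
    ffLastTruthy (l ++ [s]) = (s != "") := by
  simp [ffLastTruthy]

theorem ffBlankLast_append (l : List String) (s : String) :
    ffBlankLast (l ++ [s]) = (s == "") := by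
  simp [ffBlankLast]

theorem ffEmitAll_append (l : List String) (s : String) :
    ffEmitAll (l ++ [s]) = ffEmitStep (ffEmitAll l) s := by
  simp [ffEmitAll]

theorem ffLastTruthy_emitAll (l : List String) :
    ffLastTruthy (ffEmitAll l) = ffLastTruthy l := by
  induction l using List.reverseRecOn with
  | nil => rfl
  | append_singleton l s ih =>
    rw [ffEmitAll_append, ffLastTruthy_append, ffEmitStep]
    split <;> simp [ffLastTruthy]

theorem ffBlankLast_eq_not_truthy (l : List String) (h : l ≠ []) :
    ffBlankLast l = !ffLastTruthy l := by
  rcases List.eq_nil_or_concat l with rfl | ⟨l', s, rfl⟩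
  · exact absurd rfl h
  · rw [List.concat_eq_append, ffBlankLast_append, ffLastTruthy_append]
    cases h' : s == "" <;> simp_all

-- Main invariant: A's fold over stripped lines, started at the image (under the emit
-- pass) of an arbitrary collapsed prefix, equals the emit pass of B's collapse fold.
theorem ffMain (ms : List String) (accC : List String) :
    (ms.foldl ffStepA' (ffEmitAll accC, ffBlankLast accC)).1
      = ffEmitAll (ms.foldl ffCollapseStep accC) := by
  induction ms generalizing accC with
  | nil => rfl
  | cons s ms ih =>
    rw [List.foldl_cons, List.foldl_cons]
    by_cases hs : s = ""
    · subst hs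
      by_cases hne : accC = []
      · subst hne; simpa using ih [""]
      · have hb := ffBlankLast_eq_not_truthy accC hne
        have hie : accC.isEmpty = false := by simpa using hne
        cases ht : ffLastTruthy accC
        · have hA : ffStepA' (ffEmitAll accC, ffBlankLast accC) ""
              = (ffEmitAll accC, ffBlankLast accC) := by
            simp [ffStepA', hb, ht]
          have hC : ffCollapseStep accC "" = accC := by
            simp [ffCollapseStep, hie, ht]
          rw [hA, hC]; exact ih accC
        · have hA : ffStepA' (ffEmitAll accC, ffBlankLast accC) ""
              = (ffEmitAll accC ++ [""], true) := by
            simp [ffStepA', hb, ht]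
          have hC : ffCollapseStep accC "" = accC ++ [""] := by
            simp [ffCollapseStep, ht]
          have hE : ffEmitAll (accC ++ [""]) = ffEmitAll accC ++ [""] := by
            have hsw : (PySem.Str.startswith "" "INT." || PySem.Str.startswith "" "EXT.") = false := by
              decide
            rw [ffEmitAll_append, ffEmitStep, hsw]
            simp
          have hB : ffBlankLast (accC ++ [""]) = true := by
            simp [ffBlankLast_append]
          have h2 := ih (accC ++ [""])
          rw [hE, hB] at h2
          rw [hA, hC]; exact h2
    · have hsne : (s == "") = false := by simp [hs]
      have hC : ffCollapseStep accC s = accC ++ [s] := by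
        simp [ffCollapseStep, hs]
      have hA : ffStepA' (ffEmitAll accC, ffBlankLast accC) s
          = (ffEmitStep (ffEmitAll accC) s, false) := by
        simp only [ffStepA', ffEmitStep, hsne, Bool.false_eq_true, if_false,
          ffLastTruthy_emitAll]
        split <;> simp_all
      have h2 := ih (accC ++ [s])
      rw [ffEmitAll_append, ffBlankLast_append, hsne] at h2
      rw [hA, hC]
      exact h2

-- ===== VERDICT (by name: the statement is the Claim_ definition above) =====
theorem format_fountain_spec : Claim_equal_format_fountain := by
  intro text _
  show format_fountain text = format_fountain_alt text
  unfold format_fountain format_fountain_alt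
  refine congrArg (PySem.Str.join "\n") ?_
  have h1 : ((PySem.Str.split? text "\n").getD []).foldl ffStepA ([], false)
      = (((PySem.Str.split? text "\n").getD []).map PySem.Str.strip).foldl ffStepA' ([], false) := by
    rw [List.foldl_map]
    rfl
  have h2 := ffMain ((((PySem.Str.split? text "\n").getD []).map PySem.Str.strip)) []
  simp only [ffEmitAll, List.foldl_nil] at h2
  rw [h1]
  exact h2
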